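-- pv_equiv track=rewrite | github.com/Pasorra/project-euler | Concealed-Square.py | check
-- ===== SOURCE A (Python) =====
-- def check(num: int) -> bool:
--     numstr = str(num)
--     skip = False
--     i = 1
--     for c in numstr[:-1]:
--         if skip:
--             skip = False
--             continue
--         if c != str(i):
--             return False
--         skip = True
--         i += 1
--
--     return numstr[-1] == "0"
-- ===== SOURCE B (Python) =====
-- def check(num: int) -> bool:
--     s = str(num)
--     evens = s[0:-1:2]
--     expected = "123456789"[:len(evens)]
--     return evens == expected and s[-1] == "0"
-- ===== Notes on version B (the rewrite author's own statement) =====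
-- stated objective: simpler
-- what changed: Replaces the stateful skip-flag loop with a two-stage decomposition: extract the checked digits with one stride slice s[0:-1:2], compare that slice against the fixed prefix '123456789'[:len], then test the last character.
import Mathlib
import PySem

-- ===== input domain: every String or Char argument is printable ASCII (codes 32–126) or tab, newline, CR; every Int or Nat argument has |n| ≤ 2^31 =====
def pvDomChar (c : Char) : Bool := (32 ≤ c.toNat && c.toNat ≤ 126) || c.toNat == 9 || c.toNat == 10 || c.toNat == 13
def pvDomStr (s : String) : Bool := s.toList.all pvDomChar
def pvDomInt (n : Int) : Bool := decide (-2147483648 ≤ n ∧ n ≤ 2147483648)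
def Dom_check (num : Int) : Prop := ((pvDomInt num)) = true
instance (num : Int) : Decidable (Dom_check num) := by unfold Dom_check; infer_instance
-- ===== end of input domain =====

-- B replaces A's stateful skip-flag scan with a two-stage decomposition: stride-slice the checked
-- characters out, compare against the fixed prefix of "123456789", then test the last character.


-- ===== PORT A =====
-- the 'for c in numstr[:-1]' loop with its skip flag and counter i; 'some false' = early 'return False'
def checkLoop (cs : List Char) (skip : Bool) (i : Int) : Option Bool :=
  match cs with
  | [] => none
  | c :: rest =>
    if skip then checkLoop rest false i
    else if [c] ≠ PySem.Int.toChars i then some false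
    else checkLoop rest true (i + 1)

def check (num : Int) : Bool :=
  let numstr := PySem.Int.toChars num
  match checkLoop (PySem.List.slice numstr none (some (-1))) false 1 with
  | some b => b
  | none => decide (PySem.List.pyGet? numstr (-1) = some '0')

-- ===== PORT B =====
def check_alt (num : Int) : Bool :=
  let s := PySem.Int.toChars num
  let evens := (PySem.List.slice? s (some 0) (some (-1)) 2).getD []  -- step 2 ≠ 0: never none
  let expected := PySem.List.slice ("123456789".toList) none (some (evens.length : Int))
  decide (evens = expected) && decide (PySem.List.pyGet? s (-1) = some '0')

-- ===== PRECONDITION & SPEC =====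
def Spec_check (num : Int) (out : Bool) : Prop := out = check_alt num
instance (num : Int) (out : Bool) : Decidable (Spec_check num out) := by unfold Spec_check; infer_instance

-- ===== CLAIM (what is proved, stated in full; the proofs are below) =====
def Claim_equal_check : Prop := ∀ (num : Int), Dom_check num → Spec_check num (check num)

-- ===== LEMMAS AND PROOFS =====

-- the even-index elements of a list
def evensOf {α : Type} : List α → List α
  | [] => []
  | [a] => [a]
  | a :: _ :: rest => a :: evensOf rest

-- the digit characters i, i+1, …, 9
def digitsFrom (i : Nat) : List Char := (List.range' i (10 - i)).map fun d => Char.ofNat (48 + d)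

lemma digitsFrom_succ (i : Nat) (h : i ≤ 9) :
    digitsFrom i = Char.ofNat (48 + i) :: digitsFrom (i + 1) := by
  unfold digitsFrom
  have h10 : 10 - i = (10 - (i + 1)) + 1 := by omega
  rw [h10, List.range'_succ]
  simp

lemma toChars_digit (i : Nat) (h1 : 1 ≤ i) (h2 : i ≤ 9) :
    PySem.Int.toChars (i : Int) = [Char.ofNat (48 + i)] := by
  interval_cases i <;> decide

lemma toChars_ten_ne (a : Char) : [a] ≠ PySem.Int.toChars ((10 : Nat) : Int) := by
  intro h
  rw [show PySem.Int.toChars ((10 : Nat) : Int) = ['1', '0'] from by decide] at h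
  simp at h

lemma evensOf_dropLast_cons2 {α : Type} (a b : α) (rest : List α) :
    evensOf ((a :: b :: rest).dropLast) = a :: evensOf rest.dropLast := by
  cases rest <;> simp [evensOf]

lemma filterMap_even_eq (cs : List Char) :
    (List.range (cs.length / 2)).filterMap (fun k => cs[2 * k]?) = evensOf cs.dropLast := by
  induction cs using evensOf.induct with
  | case1 => simp [evensOf]
  | case2 a => simp [evensOf]
  | case3 a b rest ih =>
    have hlen : (a :: b :: rest).length / 2 = rest.length / 2 + 1 := by
      simp; omega
    rw [hlen, List.range_succ_eq_map, evensOf_dropLast_cons2]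
    simp only [List.filterMap_cons, List.filterMap_map]
    have h0 : (a :: b :: rest)[2 * 0]? = some a := by simp
    rw [h0]
    have hstep : ∀ k : Nat, (a :: b :: rest)[2 * (k + 1)]? = rest[2 * k]? := by
      intro k
      have : 2 * (k + 1) = 2 * k + 1 + 1 := by omega
      simp [this]
    simp only [Function.comp_def, Nat.succ_eq_add_one, hstep, ih]

lemma slice_evens (cs : List Char) :
    PySem.List.slice? cs (some 0) (some (-1)) 2 = some (evensOf cs.dropLast) := by
  rw [← filterMap_even_eq]
  simp only [PySem.List.slice?, PySem.List.sliceIndices]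
  norm_num
  have hc : (if 1 < cs.length then ((max (-1 + (cs.length : Int)) 0 + 2 - 1) / 2).toNat else 0)
      = cs.length / 2 := by
    split_ifs with h <;> omega
  have hfun : ∀ x : Nat, ((2 * (x : Int)).toNat) = 2 * x := by intro x; omega
  simp only [hfun]
  rw [hc]

-- A's loop never returns 'some true'
lemma checkLoop_cases (cs : List Char) (skip : Bool) (i : Int) :
    checkLoop cs skip i = none ∨ checkLoop cs skip i = some false := by
  induction cs generalizing skip i with
  | nil => simp [checkLoop]
  | cons c rest ih =>
    simp only [checkLoop]
    split_ifs with h1 h2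
    · exact ih false i
    · right; rfl
    · exact ih true (i + 1)

-- one unskipped step followed by one skipped step of A's loop
lemma checkLoop_step (a b : Char) (rest : List Char) (i : Int) :
    checkLoop (a :: b :: rest) false i =
      if [a] ≠ PySem.Int.toChars i then some false else checkLoop rest false (i + 1) := by
  by_cases hne : [a] ≠ PySem.Int.toChars i <;> simp [checkLoop, hne]

lemma checkLoop_one (a : Char) (i : Int) :
    checkLoop [a] false i = if [a] ≠ PySem.Int.toChars i then some false else none := by
  by_cases hne : [a] ≠ PySem.Int.toChars i <;> simp [checkLoop, hne]

-- core correspondence: the loop accepts iff the even-index chars spell the digits from i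
lemma loop_iff (cs : List Char) : ∀ (i : Nat), 1 ≤ i → i ≤ 10 →
    (checkLoop cs false (i : Int) = none ↔
      evensOf cs = (digitsFrom i).take (evensOf cs).length) := by
  induction cs using evensOf.induct with
  | case1 => intro i h1 h2; simp [checkLoop, evensOf, digitsFrom]
  | case2 a =>
    intro i h1 h2
    rw [checkLoop_one]
    rcases Nat.lt_or_ge i 10 with h | h
    · have h9 : i ≤ 9 := by omega
      rw [toChars_digit i h1 h9, digitsFrom_succ i h9]
      by_cases ha : a = Char.ofNat (48 + i) <;> simp [evensOf, ha]
    · have h10 : i = 10 := by omega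
      subst h10
      rw [if_pos (toChars_ten_ne a)]
      simp [evensOf, digitsFrom]
  | case3 a b rest ih =>
    intro i h1 h2
    rw [checkLoop_step]
    have hev : evensOf (a :: b :: rest) = a :: evensOf rest := rfl
    rcases Nat.lt_or_ge i 10 with h | h
    · have h9 : i ≤ 9 := by omega
      rw [toChars_digit i h1 h9, digitsFrom_succ i h9, hev]
      have hcast : ((i : Int) + 1) = ((i + 1 : Nat) : Int) := by push_cast; ring
      by_cases ha : a = Char.ofNat (48 + i)
      · subst ha
        rw [if_neg (by simp)]
        simp only [List.length_cons, List.take_succ_cons, List.cons.injEq, true_and]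
        rw [hcast]
        exact ih (i + 1) (by omega) (by omega)
      · rw [if_pos (by simpa using ha)]
        simp [ha]
    · have h10 : i = 10 := by omega
      subst h10
      rw [if_pos (toChars_ten_ne a), hev]
      simp [digitsFrom]

lemma prefix_chars : "123456789".toList = digitsFrom 1 := by decide

-- ===== VERDICT (by name: the statement is the Claim_ definition above) =====
theorem check_spec : Claim_equal_check := by
  unfold Claim_equal_check Spec_check
  intro num _
  unfold check check_alt
  simp only [PySem.List.slice_to_neg_one, slice_evens, Option.getD_some]
  set ns := PySem.Int.toChars num with hns
  set ev := evensOf ns.dropLast with hev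
  have hexp : PySem.List.slice ("123456789".toList) none (some ((ev.length : Nat) : Int))
      = (digitsFrom 1).take ev.length := by
    rw [PySem.List.slice_to ("123456789".toList) (b := (ev.length : Int)) (Int.natCast_nonneg _),
      prefix_chars]
    simp
  rw [hexp]
  rcases checkLoop_cases ns.dropLast false 1 with h | h
  · rw [h]
    have hiff := (loop_iff ns.dropLast 1 (by omega) (by omega)).mp
      (by exact_mod_cast h)
    rw [← hev] at hiff
    rw [decide_eq_true hiff, Bool.true_and]
  · rw [h]
    have hno : ¬ (ev = (digitsFrom 1).take ev.length) := by
      intro hc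
      have hnone := (loop_iff ns.dropLast 1 (by omega) (by omega)).mpr (by rw [← hev]; exact hc)
      rw [Nat.cast_one] at hnone
      rw [hnone] at h
      simp at h
    rw [decide_eq_false hno, Bool.false_and]
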